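-- pv_equiv track=rewrite | github.com/jaewshin/Holocene | seshat.py | identifSeq
-- ===== SOURCE A (Python) =====
-- def identifSeq(v):
--     # v is a vector-like object
--     # identify sequences along with their ranges
--
--     if(len(v) == 1):
--       return([(v,0,0)])
--
--     currentVal = v[0]
--     currentIndex = 0
--     seq = []
--     for i,x in enumerate(v[1:]):
--         if x != currentVal:
--             seq.append((currentVal,currentIndex,i))
--             currentVal = x
--             currentIndex = i+1
--     # Add the last entry
--     seq.append((currentVal,currentIndex,i+1))
--     return(seq)
-- ===== SOURCE B (Python) =====
-- def identifSeq(v):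
--     # two-phase: first compute run boundaries, then emit (value, start, end) per run
--     n = len(v)
--     bounds = [0] + [i for i in range(1, n) if v[i] != v[i - 1]] + [n]
--     return [(v[s], s, e - 1) for s, e in zip(bounds, bounds[1:])]
-- ===== Notes on version B (the rewrite author's own statement) =====
-- stated objective: alternative
-- what changed: Replaces A's single stateful pass (currentVal/currentIndex accumulator with a post-loop flush) by a stateless two-phase decomposition: first a boundary list [0]+[i: v[i]!=v[i-1]]+[n], then a zip over consecutive boundaries emitting (v[s], s, e-1).
-- outside the precondition, e.g. on identifSeq([0]): A returns [([0], 0, 0)], B returns [(0, 0, 0)]; on identifSeq([5]): A returns [([5], 0, 0)], B returns [(5, 0, 0)]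
import Mathlib
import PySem

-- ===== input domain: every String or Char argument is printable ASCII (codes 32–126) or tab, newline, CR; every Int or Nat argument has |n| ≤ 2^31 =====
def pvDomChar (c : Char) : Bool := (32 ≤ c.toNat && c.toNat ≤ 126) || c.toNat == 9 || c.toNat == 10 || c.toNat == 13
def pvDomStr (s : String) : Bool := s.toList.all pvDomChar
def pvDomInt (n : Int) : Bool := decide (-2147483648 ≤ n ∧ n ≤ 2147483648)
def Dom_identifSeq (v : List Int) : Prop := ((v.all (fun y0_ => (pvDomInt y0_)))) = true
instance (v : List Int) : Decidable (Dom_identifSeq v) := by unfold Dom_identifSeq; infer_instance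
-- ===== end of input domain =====

-- B replaces A's stateful single pass by a stateless two-phase boundary-list decomposition; same O(n) cost.
-- (A returns [(v,0,0)] for a singleton v — the whole list as first component — and raises IndexError on [];
--  both are outside Pre_identifSeq.)


-- ===== PORT A =====
-- the 'for i,x in enumerate(v[1:])' loop, as the obvious structural recursion over v[1:]
-- carrying (currentVal, currentIndex, seq) and the enumerate counter i of the head element;
-- at the end of the list the counter equals (last i)+1, which is exactly the end index
-- Python's post-loop append uses.
def identifSeqLoop (cv ci : Int) (seq : List (Int × Int × Int)) (i : Int) :
    List Int → List (Int × Int × Int)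
  | [] => seq ++ [(cv, ci, i)]
  | x :: xs =>
    if x ≠ cv then identifSeqLoop x (i + 1) (seq ++ [(cv, ci, i)]) (i + 1) xs
    else identifSeqLoop cv ci seq (i + 1) xs

def identifSeq (v : List Int) : List (Int × Int × Int) :=
  if v.length = 1 then []
    -- Python returns [(v,0,0)] here, with the whole LIST v as first component: not a value
    -- of the declared return type; excluded by Pre_identifSeq.
  else
    match v with
    | [] => []  -- Python: v[0] raises IndexError; excluded by Pre_identifSeq
    | a :: t => identifSeqLoop a 0 [] 0 t

-- ===== PORT B =====
def identifSeq_alt (v : List Int) : List (Int × Int × Int) :=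
  let n : Int := v.length
  let bounds : List Int :=
    0 :: ((PySem.List.pyRange 1 n 1).filter
            (fun i => PySem.List.pyGet? v i ≠ PySem.List.pyGet? v (i - 1))) ++ [n]
  (bounds.zip (PySem.List.slice bounds (some 1) none)).map
    (fun se => ((PySem.List.pyGet? v se.1).getD 0, se.1, se.2 - 1))
    -- v[s]: every start index s is in range here, so the .getD default is never used

-- ===== PRECONDITION & SPEC =====
-- Pre_ excludes the empty list (A raises IndexError) and singletons, where A returns
-- [(v,0,0)] with the whole LIST as first component — not a value of the declared element
-- type int — while B returns [(v[0],0,0)].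
def Pre_identifSeq (v : List Int) : Prop := 2 ≤ v.length
instance (v : List Int) : Decidable (Pre_identifSeq v) := by unfold Pre_identifSeq; infer_instance

def pvWitness_identifSeq : List Int := [1, 1, 2]

def Spec_identifSeq (v : List Int) (out : List (Int × Int × Int)) : Prop := out = identifSeq_alt v
instance (v : List Int) (out : List (Int × Int × Int)) : Decidable (Spec_identifSeq v out) := by unfold Spec_identifSeq; infer_instance

-- ===== CLAIM (what is proved, stated in full; the proofs are below) =====
def Claim_equal_identifSeq : Prop := ∀ (v : List Int), Dom_identifSeq v → Pre_identifSeq v → Spec_identifSeq v (identifSeq v)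

-- ===== LEMMAS AND PROOFS =====

-- reference function: the runs of cv :: xs where the current run starts at index ci and cv
-- sits at index pos (indices into the whole original vector)
def runsF (cv ci pos : Int) : List Int → List (Int × Int × Int)
  | [] => [(cv, ci, pos)]
  | x :: xs => if x = cv then runsF cv ci (pos + 1) xs
               else (cv, ci, pos) :: runsF x (pos + 1) (pos + 1) xs

-- boundary positions of prev :: xs where prev sits at index i-1
def bnds (i prev : Int) : List Int → List Int
  | [] => []
  | x :: xs => if x ≠ prev then i :: bnds (i + 1) x xs else bnds (i + 1) x xs

theorem identifSeqLoop_eq_runsF (xs : List Int) :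
    ∀ (cv ci i : Int) (seq : List (Int × Int × Int)),
      identifSeqLoop cv ci seq i xs = seq ++ runsF cv ci i xs := by
  induction xs with
  | nil => intro cv ci i seq; simp [identifSeqLoop, runsF]
  | cons x xs ih =>
    intro cv ci i seq
    by_cases h : x = cv
    · rw [identifSeqLoop, if_neg (by simp [h]), ih, runsF, if_pos h]
    · rw [identifSeqLoop, if_pos (by simp [h]), ih, runsF, if_neg h]
      simp

theorem drop_getElem? {v : List Int} {m : Nat} {x : Int} {xs : List Int}
    (hd : v.drop m = x :: xs) : v[m]? = some x := by
  have h0 : (v.drop m)[0]? = some x := by rw [hd]; rfl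
  simpa using h0

theorem drop_succ_of_drop {v : List Int} {m : Nat} {x : Int} {xs : List Int}
    (hd : v.drop m = x :: xs) : v.drop (m + 1) = xs := by
  rw [← List.tail_drop, hd, List.tail_cons]

theorem pyGet?_natCast_some {v : List Int} {m : Nat} {x : Int}
    (h : v[m]? = some x) : PySem.List.pyGet? v (m : Int) = some x := by
  have h1 : PySem.List.pyGet? v ((m : Nat) : Int) = v[m]? := PySem.List.pyGet?_natCast v m
  rw [h] at h1; exact h1

theorem filter_eq_bnds (v : List Int) (u : List Int) :
    ∀ (k : Nat) (prev : Int), v.drop (k + 1) = u → v[k]? = some prev →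
      (PySem.List.pyRange ((k : Int) + 1) v.length 1).filter
          (fun i => PySem.List.pyGet? v i ≠ PySem.List.pyGet? v (i - 1))
        = bnds ((k : Int) + 1) prev u := by
  induction u with
  | nil =>
    intro k prev hd _
    have hlen : v.length ≤ k + 1 := by
      have := congrArg List.length hd; simp at this; omega
    rw [PySem.List.pyRange_one_eq_nil (by exact_mod_cast hlen)]
    simp [bnds]
  | cons x xs ih =>
    intro k prev hd hg
    have hlen : k + 1 < v.length := by
      have := congrArg List.length hd; simp at this; omega
    have hx : v[k + 1]? = some x := drop_getElem? hd
    have hd' : v.drop (k + 1 + 1) = xs := drop_succ_of_drop hd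
    rw [PySem.List.pyRange_one_cons (by exact_mod_cast hlen)]
    have hgcur : PySem.List.pyGet? v ((k : Int) + 1) = some x := by
      have := pyGet?_natCast_some hx; rw [← this]; norm_cast
    have hgprev : PySem.List.pyGet? v (((k : Int) + 1) - 1) = some prev := by
      have := pyGet?_natCast_some hg; simpa using this
    have hrest := ih (k + 1) x hd' hx
    have hcast : (((k + 1 : Nat) : Int) + 1) = ((k : Int) + 1) + 1 := by push_cast; ring
    rw [hcast] at hrest
    by_cases h : x = prev
    · rw [List.filter_cons_of_neg (by simp [hgcur, h, hg]), hrest, bnds,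
        if_neg (by simp [h]), h]
    · rw [List.filter_cons_of_pos (by simp [hgcur, h, hg]), hrest, bnds, if_pos h]

theorem zipmap_eq_runsF (v : List Int) (u : List Int) :
    ∀ (ci pos : Nat) (cv : Int),
      v[ci]? = some cv →
      v.drop (pos + 1) = u →
      pos < v.length →
      (((ci : Int) :: (bnds ((pos : Int) + 1) cv u ++ [(v.length : Int)])).zip
          (bnds ((pos : Int) + 1) cv u ++ [(v.length : Int)])).map
        (fun se => ((PySem.List.pyGet? v se.1).getD 0, se.1, se.2 - 1))
        = runsF cv ci pos u := by
  induction u with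
  | nil =>
    intro ci pos cv hci hd hpos
    have hlen' : v.length = pos + 1 := by
      have := congrArg List.length hd; simp at this; omega
    have hgci := pyGet?_natCast_some hci
    simp only [bnds, List.nil_append, List.zip_cons_cons, List.zip_nil_right,
      List.map_cons, List.map_nil, runsF, hgci, Option.getD_some]
    have : ((v.length : Int)) - 1 = (pos : Int) := by rw [hlen']; push_cast; ring
    rw [this]
  | cons x xs ih =>
    intro ci pos cv hci hd hpos
    have hlen : pos + 1 < v.length := by
      have := congrArg List.length hd; simp at this; omega
    have hx : v[pos + 1]? = some x := drop_getElem? hd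
    have hd' : v.drop (pos + 1 + 1) = xs := drop_succ_of_drop hd
    have hcast : (((pos + 1 : Nat) : Int) + 1) = ((pos : Int) + 1) + 1 := by push_cast; ring
    have hcast2 : (((pos + 1 : Nat) : Int)) = ((pos : Int) + 1) := by push_cast; ring
    by_cases h : x = cv
    · -- run continues
      have hrec := ih ci (pos + 1) cv hci hd' (by omega)
      rw [hcast, hcast2] at hrec
      rw [bnds, if_neg (by simp [h]), h, runsF, if_pos rfl]
      exact hrec
    · -- boundary at pos + 1
      have hrec := ih (pos + 1) (pos + 1) x hx hd' (by omega)
      rw [hcast, hcast2] at hrec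
      rw [bnds, if_pos h, runsF, if_neg h]
      have hgci := pyGet?_natCast_some hci
      simp only [List.cons_append, List.zip_cons_cons, List.map_cons, hgci, Option.getD_some]
      rw [show ((pos : Int) + 1 - 1) = (pos : Int) from by ring, hrec]

-- ===== VERDICT (by name: the statement is the Claim_ definition above) =====
theorem identifSeq_spec : Claim_equal_identifSeq := by
  intro v _ hpre
  unfold Pre_identifSeq at hpre
  unfold Spec_identifSeq
  cases v with
  | nil => simp at hpre
  | cons a t =>
    cases t with
    | nil => simp at hpre
    | cons b t' =>
      have hA : identifSeq (a :: b :: t') = runsF a 0 0 (b :: t') := by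
        rw [identifSeq, if_neg (by simp)]
        rw [identifSeqLoop_eq_runsF]
        simp
      have hfilt := filter_eq_bnds (a :: b :: t') (b :: t') 0 a (by simp) (by simp)
      simp only [Nat.cast_zero, zero_add] at hfilt
      have hzm := zipmap_eq_runsF (a :: b :: t') (b :: t') 0 0 a (by simp) (by simp) (by simp)
      simp only [Nat.cast_zero, zero_add] at hzm
      rw [hA]
      simp only [identifSeq_alt, PySem.List.slice_from_one, hfilt]
      rw [List.cons_append, List.tail_cons]
      exact hzm.symm
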